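-- pv_equiv track=rewrite | github.com/ArushC/ciphers | transposition/manualTransDecoder.py | get_columns_list
-- ===== SOURCE A (Python) =====
-- def get_grid_key(grid):
--     return len(grid[0])
--
-- def get_columns_list(grid): #copied straight from ngramTransposition -- just changed variable names
--     i = 0
--     key = get_grid_key(grid)
--     result = [''] * key
--     while i < key:
--         for row in grid:
--             if i < len(row):
--                 result[i] += row[i]
--             else:
--                 result[i] += ' '
--
--         i += 1
--
--     return result
-- ===== SOURCE B (Python) =====
-- def get_grid_key(grid):
--     return len(grid[0])
--
-- def get_columns_list(grid):
--     key = get_grid_key(grid)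
--     padded = [row[:key].ljust(key) for row in grid]
--     return [''.join(col) for col in zip(*padded)]
-- ===== Notes on version B (the rewrite author's own statement) =====
-- stated objective: faster
-- what changed: Replaces the explicit column-index while-loop with per-cell bounds checks by padding each row to exactly `key` characters and transposing with zip(*padded), joining each column once with ''.join instead of repeated string += concatenation.
import Mathlib
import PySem

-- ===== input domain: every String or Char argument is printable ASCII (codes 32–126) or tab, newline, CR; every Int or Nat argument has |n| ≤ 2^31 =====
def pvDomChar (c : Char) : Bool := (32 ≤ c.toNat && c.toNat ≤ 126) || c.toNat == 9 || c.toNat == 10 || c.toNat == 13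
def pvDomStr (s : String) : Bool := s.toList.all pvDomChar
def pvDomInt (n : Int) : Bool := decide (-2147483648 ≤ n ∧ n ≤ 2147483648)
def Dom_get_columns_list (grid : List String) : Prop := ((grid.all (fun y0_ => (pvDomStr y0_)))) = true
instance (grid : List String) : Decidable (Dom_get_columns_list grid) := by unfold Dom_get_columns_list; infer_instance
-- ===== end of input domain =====

-- B replaces A's column-index loop (repeated string += per cell) with ljust-padding plus a transpose (zip(*padded)) and one join per column; a timing run measured B faster.
-- Pre_ excludes only the empty grid, where both Pythons raise IndexError in get_grid_key.
-- String concatenation is ported on the char-list side (String.ofList at the boundary), exact for Python str.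

-- ===== PORT A =====
def get_grid_key (grid : List String) : Nat := (grid.headD "").toList.length  -- len(grid[0]); Pre_ excludes grid = []

def get_columns_list (grid : List String) : List String :=
  let key := get_grid_key grid
  ((List.range key).foldl
    (fun res i =>
      grid.foldl (fun r row =>
        r.set i (r.getD i [] ++ (if i < row.toList.length then [row.toList.getD i ' '] else [' ']))) res)
    (List.replicate key ([] : List Char))).map String.ofList

-- ===== PORT B =====
-- zip(*padded): every padded row has length exactly `key`, so zip yields exactly `key` columns.
def pyZipCols (k : Nat) (rows : List (List Char)) : List (List Char) :=
  match k with
  | 0 => []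
  | k + 1 => rows.map (fun r => r.headD ' ') :: pyZipCols k (rows.map List.tail)

def get_columns_list_alt (grid : List String) : List String :=
  let key := get_grid_key grid
  let padded := grid.map (fun row => row.toList.take key ++ List.replicate (key - row.toList.length) ' ')
  (pyZipCols key padded).map String.ofList

-- ===== PRECONDITION & SPEC =====
-- A raises IndexError on the empty grid (grid[0]); nothing else is excluded.
def Pre_get_columns_list (grid : List String) : Prop := grid ≠ []
instance (grid : List String) : Decidable (Pre_get_columns_list grid) := by unfold Pre_get_columns_list; infer_instance
def pvWitness_get_columns_list : List String := (["abc", "de", "fghi"])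

def Spec_get_columns_list (grid : List String) (out : List String) : Prop := out = get_columns_list_alt grid
instance (grid : List String) (out : List String) : Decidable (Spec_get_columns_list grid out) := by unfold Spec_get_columns_list; infer_instance

-- ===== CLAIM (what is proved, stated in full; the proofs are below) =====
def Claim_equal_get_columns_list : Prop := ∀ (grid : List String), Dom_get_columns_list grid → Pre_get_columns_list grid → Spec_get_columns_list grid (get_columns_list grid)

-- ===== LEMMAS AND PROOFS =====

-- the character A puts into column i for a given row
def colChar (i : Nat) (row : String) : Char :=
  if i < row.toList.length then row.toList.getD i ' ' else ' '

-- setting the first slot after a prefix of length n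
theorem set_append_length {a : Type} (l1 : List a) (x : a) (l2 : List a) (v : a) (n : Nat)
    (h : l1.length = n) : (l1 ++ x :: l2).set n v = l1 ++ v :: l2 := by
  induction l1 generalizing n with
  | nil => subst h; rfl
  | cons y ys ih => subst h; simp [ih _ rfl]

-- B's transpose, characterised column by column
theorem pyZipCols_eq_map (k : Nat) :
    ∀ rows : List (List Char),
      pyZipCols k rows = (List.range k).map (fun i => rows.map (fun r => r.getD i ' ')) := by
  induction k with
  | zero => intro rows; simp [pyZipCols]
  | succ k ih =>
    intro rows
    rw [pyZipCols, ih, List.range_succ_eq_map]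
    simp only [List.map_cons, List.map_map]
    congr 1
    · apply List.map_congr_left
      intro r _
      cases r <;> simp
    · apply List.map_congr_left
      intro i _
      simp only [Function.comp]
      apply List.map_congr_left
      intro r _
      cases r <;> simp

-- the padded cell equals A's cell, for columns inside the grid width
theorem padded_getD (key i : Nat) (hi : i < key) (row : String) :
    (row.toList.take key ++ List.replicate (key - row.toList.length) ' ').getD i ' ' = colChar i row := by
  unfold colChar
  rw [List.getD_eq_getElem?_getD]
  by_cases h : i < row.toList.length
  · rw [if_pos h, List.getElem?_append_left (by rw [List.length_take]; omega), List.getElem?_take, if_pos hi,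
        List.getElem?_eq_getElem h]
    simp [List.getD_eq_getElem?_getD, List.getElem?_eq_getElem h]
  · rw [if_neg h]
    have hlt : row.toList.length < key := by omega
    have htake : row.toList.take key = row.toList := List.take_of_length_le (by omega)
    rw [htake, List.getElem?_append_right (by omega), List.getElem?_replicate, if_pos (by omega)]
    rfl

-- A's inner for-loop over the rows appends exactly the column-i characters at index i
theorem inner_fold (i : Nat) :
    ∀ (rows : List String) (res : List (List Char)), i < res.length →
      rows.foldl (fun r row =>
        r.set i (r.getD i [] ++ (if i < row.toList.length then [row.toList.getD i ' '] else [' ']))) res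
      = res.set i (res.getD i [] ++ rows.map (colChar i)) := by
  intro rows
  induction rows with
  | nil =>
    intro res h
    simp [List.getD_eq_getElem?_getD, List.getElem?_eq_getElem h, List.set_getElem_self]
  | cons row rest ih =>
    intro res hres
    simp only [List.foldl_cons]
    rw [ih _ (by simpa using hres)]
    rw [List.set_set, List.getD_eq_getElem?_getD, List.getElem?_set_self (by simpa using hres)]
    simp only [Option.getD_some, List.map_cons, List.append_assoc,
      List.getD_eq_getElem?_getD]
    congr 2
    unfold colChar
    split <;> rfl

-- A's outer while-loop fills the first n slots with the columns, leaving the rest empty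
theorem outer_fold (grid : List String) (key : Nat) :
    ∀ n, n ≤ key →
      (List.range n).foldl
        (fun res i =>
          grid.foldl (fun r row =>
            r.set i (r.getD i [] ++ (if i < row.toList.length then [row.toList.getD i ' '] else [' ']))) res)
        (List.replicate key ([] : List Char))
      = (List.range n).map (fun i => grid.map (colChar i)) ++ List.replicate (key - n) ([] : List Char) := by
  intro n
  induction n with
  | zero => intro _; simp
  | succ n ih =>
    intro hn
    rw [List.range_succ, List.foldl_append, List.foldl_cons, List.foldl_nil, ih (by omega)]
    have hrep : List.replicate (key - n) ([] : List Char)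
        = ([] : List Char) :: List.replicate (key - (n + 1)) ([] : List Char) := by
      have : key - n = (key - (n + 1)) + 1 := by omega
      rw [this, List.replicate_succ]
    rw [inner_fold _ _ _ (by simp; omega)]
    rw [hrep]
    have hlen : ((List.range n).map (fun i => grid.map (colChar i))).length = n := by simp
    rw [List.getD_eq_getElem?_getD, List.getElem?_append_right (by omega), hlen, Nat.sub_self]
    simp only [List.getElem?_cons_zero, Option.getD_some, List.nil_append]
    rw [set_append_length _ _ _ _ _ hlen]
    simp

-- ===== VERDICT (by name: the statement is the Claim_ definition above) =====
theorem get_columns_list_spec : Claim_equal_get_columns_list := by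
  intro grid _ _
  unfold Spec_get_columns_list get_columns_list get_columns_list_alt
  dsimp only
  rw [outer_fold grid (get_grid_key grid) (get_grid_key grid) le_rfl,
      pyZipCols_eq_map]
  simp only [Nat.sub_self, List.replicate_zero, List.append_nil, List.map_map]
  apply List.map_congr_left
  intro i hi
  simp only [Function.comp]
  congr 1
  apply List.map_congr_left
  intro row _
  simp only [Function.comp]
  exact (padded_getD (get_grid_key grid) i (List.mem_range.mp hi) row).symm
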